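-- pv_equiv track=rewrite | github.com/john01diaz/satfcopy | sat_workflow_source/b_code/etl_processes/etl_layers/python/base_scripts/silver/silver_01_Data_Loaders_Functions.py | getCableCatalogue
-- ===== SOURCE A (Python) =====
-- def getCableCatalogue(c, t):
--     t = t.upper()
--     if c:
--         c = c.upper()
--     else:
--         return None
--     if t == "OAS_Coll_SH":
--         if any(i in c for i in ["ST", "K", "C"]):
--             return "TRUE"
--     elif t == "GSCR":
--         GScr = ["PIMF", "TIMF"]
--         if any(i in c for i in GScr):
--             return "TRUE"
--     elif t == "ARMOURED":
--         if "RE%" in c and any(i in c for i in ["SWA", "RG", "FG", "B", "Q"]):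
--             return "TRUE"
--         elif "N%" in c and any(i in c for i in ["B", "G", "F", "R"]):
--             return "TRUE"
--         elif "A%" in c and "B" in c:
--             return "TRUE"
--         elif "J%" in c and "B" in c:
--             return "TRUE"
--         elif "S%" in c and "B" in c:
--             return "TRUE"
--     elif t == "ARMOURDESCRIPTION":
--         if "N%" in c and "B" in c:
--             return "Steel tape armouring"
--         elif "N%" in c and "F" in c:
--             return "Armouring of galvanized flat steel wire"
--         elif "N%" in c and "G" in c:
--             return "Helix of galvanized steel tape"
--         elif "N%" in c and "R" in c:
--             return "Armouring of galvanized round steel wires"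
--         elif "RE%" in c and "SWA" in c:
--             return "Galvanised round steel wires"
--         elif "RE%" in c and "RG" in c:
--             return "Galvanised round steel wires with counter helix made of galvanised steel tape"
--         elif "RE%" in c and "FG" in c:
--             return "Galvanised flat steel wires with counter helix made of galvanised steel tape"
--         elif "RE%" in c and "B" in c:
--             return "Double layer made of galvanised steel tape"
--         elif "RE%" in c and "Q" in c:
--             return "Braide made of galvanised steel tape"
--         elif (
--             ("A%" in c and "B" in c)
--             or ("J%" in c and "B" in c)
--             or ("S%" in c and "B" in c)
--         ):
--             return "Armouring"
--     else:
--         return "FALSE"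
-- ===== SOURCE B (Python) =====
-- # Table-driven rewrite: each type maps to an ordered rule list; a rule fires when
-- # every group has some required substring present; first firing rule wins.
-- RULES = {
--     "OAS_Coll_SH": [([["ST", "K", "C"]], "TRUE")],
--     "GSCR": [([["PIMF", "TIMF"]], "TRUE")],
--     "ARMOURED": [
--         ([["RE%"], ["SWA", "RG", "FG", "B", "Q"]], "TRUE"),
--         ([["N%"], ["B", "G", "F", "R"]], "TRUE"),
--         ([["B"], ["A%", "J%", "S%"]], "TRUE"),
--     ],
--     "ARMOURDESCRIPTION": [
--         ([["N%"], ["B"]], "Steel tape armouring"),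
--         ([["N%"], ["F"]], "Armouring of galvanized flat steel wire"),
--         ([["N%"], ["G"]], "Helix of galvanized steel tape"),
--         ([["N%"], ["R"]], "Armouring of galvanized round steel wires"),
--         ([["RE%"], ["SWA"]], "Galvanised round steel wires"),
--         ([["RE%"], ["RG"]], "Galvanised round steel wires with counter helix made of galvanised steel tape"),
--         ([["RE%"], ["FG"]], "Galvanised flat steel wires with counter helix made of galvanised steel tape"),
--         ([["RE%"], ["B"]], "Double layer made of galvanised steel tape"),
--         ([["RE%"], ["Q"]], "Braide made of galvanised steel tape"),
--         ([["B"], ["A%", "J%", "S%"]], "Armouring"),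
--     ],
-- }
--
--
-- def getCableCatalogue(c, t):
--     t = t.upper()
--     if not c:
--         return None
--     c = c.upper()
--     rules = RULES.get(t)
--     if rules is None:
--         return "FALSE"
--     for groups, result in rules:
--         if all(any(s in c for s in g) for g in groups):
--             return result
--     return None
-- ===== Notes on version B (the rewrite author's own statement) =====
-- stated objective: simpler
-- what changed: Replaces the hard-coded if/elif chains with a data-driven rule table (type -> ordered list of (substring-groups, result) rules) evaluated by one generic first-match loop.
import Mathlib
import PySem

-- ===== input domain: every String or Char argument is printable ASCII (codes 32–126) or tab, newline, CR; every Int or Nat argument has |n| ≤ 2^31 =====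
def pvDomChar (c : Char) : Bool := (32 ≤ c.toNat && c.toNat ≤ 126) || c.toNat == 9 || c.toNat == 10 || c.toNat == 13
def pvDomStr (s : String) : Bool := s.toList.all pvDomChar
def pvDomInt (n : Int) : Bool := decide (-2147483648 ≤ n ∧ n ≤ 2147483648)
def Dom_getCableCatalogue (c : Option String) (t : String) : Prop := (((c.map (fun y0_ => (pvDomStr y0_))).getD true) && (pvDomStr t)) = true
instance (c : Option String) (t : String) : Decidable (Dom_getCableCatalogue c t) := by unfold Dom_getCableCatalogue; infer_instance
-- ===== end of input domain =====

-- ===== PORT A =====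
def getCableCatalogue (c : Option String) (t : String) : Option String :=
  let t := PySem.Str.upper t
  match c with
  | none => none
  | some cs =>
    if cs = "" then none
    else
      let c := PySem.Str.upper cs
      if t = "OAS_Coll_SH" then
        (if (["ST", "K", "C"].any fun i => PySem.Str.isIn i c) then some "TRUE" else none)
      else if t = "GSCR" then
        let gscr := ["PIMF", "TIMF"]
        (if (gscr.any fun i => PySem.Str.isIn i c) then some "TRUE" else none)
      else if t = "ARMOURED" then
        (if PySem.Str.isIn "RE%" c && (["SWA", "RG", "FG", "B", "Q"].any fun i => PySem.Str.isIn i c) then some "TRUE"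
         else if PySem.Str.isIn "N%" c && (["B", "G", "F", "R"].any fun i => PySem.Str.isIn i c) then some "TRUE"
         else if PySem.Str.isIn "A%" c && PySem.Str.isIn "B" c then some "TRUE"
         else if PySem.Str.isIn "J%" c && PySem.Str.isIn "B" c then some "TRUE"
         else if PySem.Str.isIn "S%" c && PySem.Str.isIn "B" c then some "TRUE"
         else none)
      else if t = "ARMOURDESCRIPTION" then
        (if PySem.Str.isIn "N%" c && PySem.Str.isIn "B" c then some "Steel tape armouring"
         else if PySem.Str.isIn "N%" c && PySem.Str.isIn "F" c then some "Armouring of galvanized flat steel wire"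
         else if PySem.Str.isIn "N%" c && PySem.Str.isIn "G" c then some "Helix of galvanized steel tape"
         else if PySem.Str.isIn "N%" c && PySem.Str.isIn "R" c then some "Armouring of galvanized round steel wires"
         else if PySem.Str.isIn "RE%" c && PySem.Str.isIn "SWA" c then some "Galvanised round steel wires"
         else if PySem.Str.isIn "RE%" c && PySem.Str.isIn "RG" c then some "Galvanised round steel wires with counter helix made of galvanised steel tape"
         else if PySem.Str.isIn "RE%" c && PySem.Str.isIn "FG" c then some "Galvanised flat steel wires with counter helix made of galvanised steel tape"
         else if PySem.Str.isIn "RE%" c && PySem.Str.isIn "B" c then some "Double layer made of galvanised steel tape"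
         else if PySem.Str.isIn "RE%" c && PySem.Str.isIn "Q" c then some "Braide made of galvanised steel tape"
         else if (PySem.Str.isIn "A%" c && PySem.Str.isIn "B" c)
                 || (PySem.Str.isIn "J%" c && PySem.Str.isIn "B" c)
                 || (PySem.Str.isIn "S%" c && PySem.Str.isIn "B" c) then some "Armouring"
         else none)
      else some "FALSE"

-- ===== PORT B =====
-- B: data-driven rule table, one generic first-match evaluator (same return values as A).
def pvHit (u : String) (g : List String) : Bool := g.any fun s => PySem.Str.isIn s u

def pvFirstRule (u : String) : List (List (List String) × String) → Option String
  | [] => none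
  | (groups, res) :: rest => if groups.all (pvHit u) then some res else pvFirstRule u rest

def pvRules : PySem.Dict String (List (List (List String) × String)) :=
  PySem.Dict.mk [
    ("OAS_Coll_SH", [([["ST", "K", "C"]], "TRUE")]),
    ("GSCR", [([["PIMF", "TIMF"]], "TRUE")]),
    ("ARMOURED", [
      ([["RE%"], ["SWA", "RG", "FG", "B", "Q"]], "TRUE"),
      ([["N%"], ["B", "G", "F", "R"]], "TRUE"),
      ([["B"], ["A%", "J%", "S%"]], "TRUE")]),
    ("ARMOURDESCRIPTION", [
      ([["N%"], ["B"]], "Steel tape armouring"),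
      ([["N%"], ["F"]], "Armouring of galvanized flat steel wire"),
      ([["N%"], ["G"]], "Helix of galvanized steel tape"),
      ([["N%"], ["R"]], "Armouring of galvanized round steel wires"),
      ([["RE%"], ["SWA"]], "Galvanised round steel wires"),
      ([["RE%"], ["RG"]], "Galvanised round steel wires with counter helix made of galvanised steel tape"),
      ([["RE%"], ["FG"]], "Galvanised flat steel wires with counter helix made of galvanised steel tape"),
      ([["RE%"], ["B"]], "Double layer made of galvanised steel tape"),
      ([["RE%"], ["Q"]], "Braide made of galvanised steel tape"),
      ([["B"], ["A%", "J%", "S%"]], "Armouring")])]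

def getCableCatalogue_alt (c : Option String) (t : String) : Option String :=
  let tu := PySem.Str.upper t
  match c with
  | none => none
  | some cs =>
    if cs = "" then none
    else
      let u := PySem.Str.upper cs
      match pvRules.get? tu with
      | none => some "FALSE"
      | some rules => pvFirstRule u rules

-- ===== PRECONDITION & SPEC =====
def Spec_getCableCatalogue (c : Option String) (t : String) (out : Option String) : Prop := out = getCableCatalogue_alt c t
instance (c : Option String) (t : String) (out : Option String) : Decidable (Spec_getCableCatalogue c t out) := by unfold Spec_getCableCatalogue; infer_instance

-- ===== CLAIM (what is proved, stated in full; the proofs are below) =====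
def Claim_equal_getCableCatalogue : Prop := ∀ (c : Option String) (t : String), Dom_getCableCatalogue c t → Spec_getCableCatalogue c t (getCableCatalogue c t)

-- ===== LEMMAS AND PROOFS =====
set_option maxHeartbeats 1000000 in
theorem getCableCatalogue_eq (c : Option String) (t : String) :
    getCableCatalogue c t = getCableCatalogue_alt c t := by
  cases c with
  | none => rfl
  | some cs =>
    by_cases hcs : cs = ""
    · simp [getCableCatalogue, getCableCatalogue_alt, hcs]
    · simp only [getCableCatalogue, getCableCatalogue_alt, hcs, if_false]
      by_cases h1 : PySem.Str.upper t = "OAS_Coll_SH"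
      · rw [h1]
        simp [pvRules, PySem.Dict.get?_mk_cons, pvFirstRule, pvHit]
      · by_cases h2 : PySem.Str.upper t = "GSCR"
        · rw [h2]
          simp [pvRules, PySem.Dict.get?_mk_cons, pvFirstRule, pvHit]
        · by_cases h3 : PySem.Str.upper t = "ARMOURED"
          · rw [h3]
            simp [pvRules, PySem.Dict.get?_mk_cons, pvFirstRule, pvHit]
            generalize PySem.Chars.isIn ['R', 'E', '%'] (PySem.Chars.upper cs.toList) = bRE
            generalize PySem.Chars.isIn ['S', 'W', 'A'] (PySem.Chars.upper cs.toList) = bSWA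
            generalize PySem.Chars.isIn ['R', 'G'] (PySem.Chars.upper cs.toList) = bRG
            generalize PySem.Chars.isIn ['F', 'G'] (PySem.Chars.upper cs.toList) = bFG
            generalize PySem.Chars.isIn ['Q'] (PySem.Chars.upper cs.toList) = bQ
            generalize PySem.Chars.isIn ['N', '%'] (PySem.Chars.upper cs.toList) = bN
            generalize PySem.Chars.isIn ['G'] (PySem.Chars.upper cs.toList) = bG
            generalize PySem.Chars.isIn ['F'] (PySem.Chars.upper cs.toList) = bF
            generalize PySem.Chars.isIn ['R'] (PySem.Chars.upper cs.toList) = bR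
            generalize PySem.Chars.isIn ['A', '%'] (PySem.Chars.upper cs.toList) = bA
            generalize PySem.Chars.isIn ['J', '%'] (PySem.Chars.upper cs.toList) = bJ
            generalize PySem.Chars.isIn ['S', '%'] (PySem.Chars.upper cs.toList) = bS
            generalize PySem.Chars.isIn ['B'] (PySem.Chars.upper cs.toList) = bB
            revert bRE bSWA bRG bFG bQ bN bG bF bR bA bJ bS bB
            decide
          · by_cases h4 : PySem.Str.upper t = "ARMOURDESCRIPTION"
            · rw [h4]
              simp [pvRules, PySem.Dict.get?_mk_cons, pvFirstRule, pvHit]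
              generalize PySem.Chars.isIn ['R', 'E', '%'] (PySem.Chars.upper cs.toList) = bRE
              generalize PySem.Chars.isIn ['S', 'W', 'A'] (PySem.Chars.upper cs.toList) = bSWA
              generalize PySem.Chars.isIn ['R', 'G'] (PySem.Chars.upper cs.toList) = bRG
              generalize PySem.Chars.isIn ['F', 'G'] (PySem.Chars.upper cs.toList) = bFG
              generalize PySem.Chars.isIn ['Q'] (PySem.Chars.upper cs.toList) = bQ
              generalize PySem.Chars.isIn ['N', '%'] (PySem.Chars.upper cs.toList) = bN
              generalize PySem.Chars.isIn ['G'] (PySem.Chars.upper cs.toList) = bG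
              generalize PySem.Chars.isIn ['F'] (PySem.Chars.upper cs.toList) = bF
              generalize PySem.Chars.isIn ['R'] (PySem.Chars.upper cs.toList) = bR
              generalize PySem.Chars.isIn ['A', '%'] (PySem.Chars.upper cs.toList) = bA
              generalize PySem.Chars.isIn ['J', '%'] (PySem.Chars.upper cs.toList) = bJ
              generalize PySem.Chars.isIn ['S', '%'] (PySem.Chars.upper cs.toList) = bS
              generalize PySem.Chars.isIn ['B'] (PySem.Chars.upper cs.toList) = bB
              revert bRE bSWA bRG bFG bQ bN bG bF bR bA bJ bS bB
              decide
            · have g1 : ¬ ("OAS_Coll_SH" = PySem.Str.upper t) := fun h => h1 h.symm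
              have g2 : ¬ ("GSCR" = PySem.Str.upper t) := fun h => h2 h.symm
              have g3 : ¬ ("ARMOURED" = PySem.Str.upper t) := fun h => h3 h.symm
              have g4 : ¬ ("ARMOURDESCRIPTION" = PySem.Str.upper t) := fun h => h4 h.symm
              simp [pvRules, PySem.Dict.get?_mk_cons, beq_iff_eq, g1, g2, g3, g4, h1, h2, h3, h4]
              try rfl

-- ===== VERDICT (by name: the statement is the Claim_ definition above) =====
theorem getCableCatalogue_spec : Claim_equal_getCableCatalogue := by
  intro c t _
  unfold Spec_getCableCatalogue
  exact getCableCatalogue_eq c t
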